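-- pv_equiv track=rewrite | github.com/okaihe/eh-eastern | main.py | find_next_min_index
-- ===== SOURCE A (Python) =====
-- def find_next_min_index(lst, start_index, degrees):
--     filtered_lst = [x for i, x in enumerate(lst) if i not in degrees]
--     if not filtered_lst:
--         return None, None
--     min_value = min(filtered_lst)
--     min_indices = [i for i, x in enumerate(lst) if x == min_value and i not in degrees]
--     checked = False
--     result_index = -1
--     for index in min_indices:
--         if index > start_index:
--             result_index = index
--             checked = True
--     if not checked:
--         result_index = min_indices[0] if min_indices else None
--     result_distance = min_value
--     return result_index, result_distance
-- ===== SOURCE B (Python) =====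
-- def find_next_min_index(lst, start_index, degrees):
--     excluded = set(degrees)
--     min_value = None
--     first_idx = None
--     last_gt_idx = None
--     for i, x in enumerate(lst):
--         if i in excluded:
--             continue
--         if min_value is None or x < min_value:
--             min_value = x
--             first_idx = i
--             last_gt_idx = i if i > start_index else None
--         elif x == min_value and i > start_index:
--             last_gt_idx = i
--     if min_value is None:
--         return None, None
--     return (last_gt_idx if last_gt_idx is not None else first_idx, min_value)
-- ===== Notes on version B (the rewrite author's own statement) =====
-- stated objective: simpler
-- what changed: B replaces A's four sequential passes (filter, min(), collect min-indices, scan for the last index > start_index) by one fused pass over enumerate(lst) maintaining min_value, the first index at the minimum, and the last index > start_index at the minimum.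
import Mathlib
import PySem

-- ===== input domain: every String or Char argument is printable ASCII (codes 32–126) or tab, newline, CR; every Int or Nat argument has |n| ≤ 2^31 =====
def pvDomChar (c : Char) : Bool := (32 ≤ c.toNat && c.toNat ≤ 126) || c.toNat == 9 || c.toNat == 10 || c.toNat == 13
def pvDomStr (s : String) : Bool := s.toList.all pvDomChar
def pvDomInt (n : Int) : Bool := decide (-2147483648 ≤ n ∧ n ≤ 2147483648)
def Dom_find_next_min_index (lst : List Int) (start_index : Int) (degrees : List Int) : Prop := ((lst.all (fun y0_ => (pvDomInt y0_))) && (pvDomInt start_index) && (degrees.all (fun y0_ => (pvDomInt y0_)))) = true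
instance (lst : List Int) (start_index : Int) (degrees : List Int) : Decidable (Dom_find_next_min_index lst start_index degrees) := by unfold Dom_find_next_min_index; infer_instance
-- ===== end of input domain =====

-- B fuses A's four passes (filter, min(), collect min-indices, pick index) into one loop over
-- enumerate(lst) maintaining (min_value, first index at the min, last index > start_index at the min).


-- ===== PORT A =====
def find_next_min_index (lst : List Int) (start_index : Int) (degrees : List Int) : Option Int × Option Int :=
  -- filtered_lst = [x for i, x in enumerate(lst) if i not in degrees]
  let filtered_lst := ((PySem.List.enumerate lst 0).filter (fun p => !(degrees.contains p.1))).map (fun p => p.2)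
  -- `if not filtered_lst: return None, None` + `min_value = min(filtered_lst)` (min? = none exactly on [])
  match PySem.List.min? filtered_lst (fun x => x) with
  | none => (none, none)
  | some min_value =>
    -- min_indices = [i for i, x in enumerate(lst) if x == min_value and i not in degrees]
    let min_indices := ((PySem.List.enumerate lst 0).filter (fun p => p.2 == min_value && !(degrees.contains p.1))).map (fun p => p.1)
    -- for index in min_indices: if index > start_index: result_index = index; checked = True
    let st := min_indices.foldl (fun (rc : Int × Bool) index => if index > start_index then (index, true) else rc) ((-1 : Int), false)
    -- if not checked: result_index = min_indices[0] if min_indices else None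
    (if st.2 then some st.1 else min_indices.head?, some min_value)

-- ===== PORT B =====
-- the loop body of Source B on a non-excluded (i, x); state = (min_value, first_idx, last_gt_idx)
def fnmUpdate (start_index : Int) (st : Option Int × Option Int × Option Int) (p : Int × Int) : Option Int × Option Int × Option Int :=
  match st.1 with
  | none => (some p.2, some p.1, if p.1 > start_index then some p.1 else none)
  | some mv =>
    if p.2 < mv then (some p.2, some p.1, if p.1 > start_index then some p.1 else none)
    else if p.2 == mv && p.1 > start_index then (some mv, st.2.1, some p.1)
    else st

def find_next_min_index_alt (lst : List Int) (start_index : Int) (degrees : List Int) : Option Int × Option Int :=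
  let excluded : PySem.Set Int := PySem.Set.ofList degrees
  let st := (PySem.List.enumerate lst 0).foldl
    (fun acc p => if excluded.contains p.1 then acc else fnmUpdate start_index acc p)
    (none, none, none)
  match st.1 with
  | none => (none, none)
  | some mv => (st.2.2.or st.2.1, some mv)

-- ===== PRECONDITION & SPEC =====
def Spec_find_next_min_index (lst : List Int) (start_index : Int) (degrees : List Int) (out : Option Int × Option Int) : Prop := out = find_next_min_index_alt lst start_index degrees
instance (lst : List Int) (start_index : Int) (degrees : List Int) (out : Option Int × Option Int) : Decidable (Spec_find_next_min_index lst start_index degrees out) := by unfold Spec_find_next_min_index; infer_instance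

-- ===== CLAIM (what is proved, stated in full; the proofs are below) =====
def Claim_equal_find_next_min_index : Prop := ∀ (lst : List Int) (start_index : Int) (degrees : List Int), Dom_find_next_min_index lst start_index degrees → Spec_find_next_min_index lst start_index degrees (find_next_min_index lst start_index degrees)

-- ===== LEMMAS AND PROOFS =====

-- indices of the pairs in l whose value equals m (A's min_indices, over the filtered pair list)
def fnmMi (m : Int) (l : List (Int × Int)) : List Int :=
  (l.filter (fun p => p.2 == m)).map (fun p => p.1)

-- closed description of B's loop state after consuming the pair list l
def fnmDescr (start_index : Int) (l : List (Int × Int)) : Option Int × Option Int × Option Int :=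
  match PySem.List.min? (l.map (fun p => p.2)) (fun x => x) with
  | none => (none, none, none)
  | some m => (some m, (fnmMi m l).head?,
      ((fnmMi m l).filter (fun i => decide (i > start_index))).getLast?)

lemma fnm_min_append (v : List Int) (x m : Int) (h : PySem.List.min? v (fun y => y) = some m) :
    PySem.List.min? (v ++ [x]) (fun y => y) = some (min m x) := by
  cases v with
  | nil => simp [PySem.List.min?] at h
  | cons a t =>
    rw [PySem.List.min?_id_cons] at h
    rw [List.cons_append, PySem.List.min?_id_cons, List.foldl_append]
    simp_all

lemma fnmMi_append (m : Int) (l : List (Int × Int)) (p : Int × Int) :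
    fnmMi m (l ++ [p]) = fnmMi m l ++ (if p.2 == m then [p.1] else []) := by
  by_cases h : p.2 = m <;> simp [fnmMi, List.filter_append, h]

lemma fnmDescr_append (s : Int) (l : List (Int × Int)) (p : Int × Int) :
    fnmDescr s (l ++ [p]) = fnmUpdate s (fnmDescr s l) p := by
  rcases hm : PySem.List.min? (l.map (fun q => q.2)) (fun x => x) with _ | m
  · -- l is empty
    have hl : l = [] := by
      have := (PySem.List.min?_eq_none_iff _ _).mp hm
      simpa using this
    subst hl
    by_cases hgt : p.1 > s <;>
      simp [fnmDescr, fnmUpdate, fnmMi, PySem.List.min?, hgt]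
  · have hmem : m ∈ l.map (fun q => q.2) := PySem.List.min?_mem hm
    have hmin : ∀ y ∈ l.map (fun q => q.2), m ≤ y := by
      intro y hy; exact PySem.List.min?_isMin hm y hy
    have happ : PySem.List.min? (l.map (fun q => q.2) ++ [p.2]) (fun x => x)
        = some (min m p.2) := fnm_min_append _ _ _ hm
    rcases lt_trichotomy p.2 m with hlt | heq | hgt'
    · -- strictly smaller value: state resets
      have hminv : min m p.2 = p.2 := by omega
      have hmi_nil : fnmMi p.2 l = [] := by
        unfold fnmMi
        have : l.filter (fun q => q.2 == p.2) = [] := by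
          rw [List.filter_eq_nil_iff]
          intro q hq hbeq
          have := hmin q.2 (List.mem_map_of_mem hq)
          simp at hbeq; omega
        simp [this]
      by_cases hgt : p.1 > s <;>
        simp [fnmDescr, happ, hminv, hmi_nil, fnmMi_append, fnmUpdate, hm, hlt, hgt]
    · -- equal value
      subst heq
      have hmi_ne : fnmMi p.2 l ≠ [] := by
        unfold fnmMi
        rcases List.mem_map.mp hmem with ⟨q, hq, hq2⟩
        have : q ∈ l.filter (fun r => r.2 == p.2) := by
          refine List.mem_filter.mpr ⟨hq, by simp [hq2]⟩
        intro hnil; rw [List.map_eq_nil_iff] at hnil; simp [hnil] at this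
      have hhead : (fnmMi p.2 l).head?.or (some p.1) = (fnmMi p.2 l).head? := by
        rcases List.exists_cons_of_ne_nil hmi_ne with ⟨a, t, hat⟩
        simp [hat]
      by_cases hgt : p.1 > s <;>
        simp [fnmDescr, happ, hm, fnmMi_append, fnmUpdate, hgt, hhead,
          List.filter_append]
    · -- strictly larger value: nothing changes
      have hminv : min m p.2 = m := by omega
      have hne : ¬ (p.2 = m) := by omega
      have hnlt : ¬ (p.2 < m) := by omega
      simp [fnmDescr, happ, hminv, hm, fnmMi_append, fnmUpdate, hne, hnlt]

lemma fnm_foldl_eq_descr (s : Int) (l : List (Int × Int)) :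
    l.foldl (fnmUpdate s) (none, none, none) = fnmDescr s l := by
  induction l using List.reverseRecOn with
  | nil => simp [fnmDescr, PySem.List.min?]
  | append_singleton l p ih =>
    rw [List.foldl_append, List.foldl_cons, List.foldl_nil, ih, fnmDescr_append]

-- A's result-index loop, characterised by the last filtered element
lemma fnm_foldlA (s : Int) (mi : List Int) (rc : Int × Bool) :
    mi.foldl (fun (rc : Int × Bool) index => if index > s then (index, true) else rc) rc
    = match (mi.filter (fun i => decide (i > s))).getLast? with
      | none => rc
      | some a => (a, true) := by
  induction mi using List.reverseRecOn with
  | nil => simp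
  | append_singleton t i ih =>
    rw [List.foldl_append, List.foldl_cons, List.foldl_nil, ih, List.filter_append]
    by_cases hgt : i > s
    · simp [hgt]
    · simp [hgt]

-- B's guarded loop over enumerate = the plain loop over the filtered pair list
lemma fnm_guard (s : Int) (degrees : List Int) (l : List (Int × Int)) (init : Option Int × Option Int × Option Int) :
    l.foldl (fun acc p => if (PySem.Set.ofList degrees).contains p.1 then acc else fnmUpdate s acc p) init
    = (l.filter (fun p => !(degrees.contains p.1))).foldl (fnmUpdate s) init := by
  have hstep : (fun (acc : Option Int × Option Int × Option Int) (p : Int × Int) =>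
      if (PySem.Set.ofList degrees).contains p.1 then acc else fnmUpdate s acc p)
      = (fun acc p => if (!(degrees.contains p.1)) = true then fnmUpdate s acc p else acc) := by
    funext acc p
    have hc : (PySem.Set.ofList degrees).contains p.1 = degrees.contains p.1 := by
      simp [PySem.Set.contains]
    rw [hc]
    cases h : degrees.contains p.1 <;> simp
  rw [hstep, PySem.List.foldl_if_eq_foldl_filter]

-- ===== VERDICT (by name: the statement is the Claim_ definition above) =====
theorem find_next_min_index_spec : Claim_equal_find_next_min_index := by
  intro lst s degrees _
  unfold Spec_find_next_min_index
  simp only [find_next_min_index, find_next_min_index_alt]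
  rw [fnm_guard, fnm_foldl_eq_descr]
  set fl := (PySem.List.enumerate lst 0).filter (fun p => !(degrees.contains p.1)) with hfl
  rcases hm : PySem.List.min? (fl.map (fun p => p.2)) (fun x => x) with _ | m
  · simp [fnmDescr, hm]
  · have hmi : ((PySem.List.enumerate lst 0).filter (fun p => p.2 == m && !(degrees.contains p.1))).map (fun p => p.1)
        = fnmMi m fl := by
      unfold fnmMi
      rw [hfl, List.filter_filter]
    simp only [hm, hmi, fnmDescr]
    rw [fnm_foldlA]
    rcases hlast : ((fnmMi m fl).filter (fun i => decide (i > s))).getLast? with _ | a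
    · simp
    · simp
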